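-- pv_equiv track=rewrite | github.com/Hojun-Cho/PS | LV1/숫자게임.py | solution
-- ===== SOURCE A (Python) =====
-- def solution(A, B):
--     answer=0
--     A.sort()
--     B.sort()
--     while A   and B  :
--         if A[-1] < B[-1] :
--             answer +=1
--             B.pop()
--             A.pop()
--         elif A[-1] >= B[-1] :
--             A.pop()
--     return answer
-- ===== SOURCE B (Python) =====
-- def solution(A, B):
--     A.sort()
--     B.sort()
--     i = 0
--     count = 0
--     for b in B:
--         if i < len(A) and A[i] < b:
--             count += 1
--             i += 1
--     return count
-- ===== Notes on version B (the rewrite author's own statement) =====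
-- stated objective: idiomatic
-- what changed: Replaces the destructive while-loop that repeatedly pops the largest elements off both sorted lists with a single forward two-pointer pass over the sorted lists from the smallest elements upward (both B's also sort the arguments in place, matching A's mutation).
import Mathlib
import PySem

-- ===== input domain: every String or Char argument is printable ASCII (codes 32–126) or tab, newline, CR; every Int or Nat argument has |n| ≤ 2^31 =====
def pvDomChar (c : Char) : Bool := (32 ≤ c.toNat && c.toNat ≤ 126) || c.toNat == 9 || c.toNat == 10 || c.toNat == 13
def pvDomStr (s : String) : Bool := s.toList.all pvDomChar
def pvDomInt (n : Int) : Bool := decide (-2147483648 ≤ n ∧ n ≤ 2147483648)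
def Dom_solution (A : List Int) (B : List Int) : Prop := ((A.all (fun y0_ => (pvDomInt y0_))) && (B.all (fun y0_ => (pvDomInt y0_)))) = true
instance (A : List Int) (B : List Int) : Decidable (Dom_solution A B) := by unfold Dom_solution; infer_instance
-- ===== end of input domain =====

-- B replaces A's destructive pop-from-the-top while-loop with a forward two-pointer pass over
-- the sorted lists (idiomatic; both versions sort the arguments in place, return value proved equal).

-- ===== PORT A =====
-- the while loop: both lists sorted ascending, compare and pop last elements
def solutionLoop (as bs : List Int) : Int :=
  if h : as ≠ [] ∧ bs ≠ [] then
    if as.getLast h.1 < bs.getLast h.2 then 1 + solutionLoop as.dropLast bs.dropLast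
    else solutionLoop as.dropLast bs
  else 0
termination_by as.length
decreasing_by
  · have := List.length_pos_of_ne_nil h.1; simp [List.length_dropLast]; omega
  · have := List.length_pos_of_ne_nil h.1; simp [List.length_dropLast]; omega

def solution (A : List Int) (B : List Int) : Int :=
  solutionLoop (PySem.List.sorted A (fun x => x) false) (PySem.List.sorted B (fun x => x) false)

-- ===== PORT B =====
def solution_alt (A : List Int) (B : List Int) : Int :=
  let sA := PySem.List.sorted A (fun x => x) false
  let sB := PySem.List.sorted B (fun x => x) false
  (sB.foldl (fun (st : Int × Int) b =>
      if st.1 < (sA.length : Int) ∧ PySem.List.pyGetD sA st.1 0 < b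
      then (st.1 + 1, st.2 + 1) else st) ((0 : Int), (0 : Int))).2

-- ===== PRECONDITION & SPEC =====
def Spec_solution (A : List Int) (B : List Int) (out : Int) : Prop := out = solution_alt A B
instance (A : List Int) (B : List Int) (out : Int) : Decidable (Spec_solution A B out) := by unfold Spec_solution; infer_instance

-- ===== CLAIM (what is proved, stated in full; the proofs are below) =====
def Claim_equal_solution : Prop := ∀ (A : List Int) (B : List Int), Dom_solution A B → Spec_solution A B (solution A B)

-- ===== LEMMAS AND PROOFS =====

-- abstract version of B's two-pointer pass: consume A's head on a match, else B's head
def gLoop : List Int → List Int → Int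
  | _, [] => 0
  | [], _ => 0
  | a :: as, b :: bs => if a < b then 1 + gLoop as bs else gLoop (a :: as) bs

theorem gLoop_nil_right (A : List Int) : gLoop A [] = 0 := by cases A <;> rfl

theorem gLoop_nil_left (B : List Int) : gLoop [] B = 0 := by cases B <;> rfl

-- appending to A an element no B element beats does not change the count
theorem gLoop_append_big (B : List Int) : ∀ (A : List Int) (x : Int),
    (∀ b ∈ B, ¬ x < b) → gLoop (A ++ [x]) B = gLoop A B := by
  induction B with
  | nil => intro A x _; simp [gLoop_nil_right]
  | cons b bs ih =>
    intro A x hx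
    have hxb : ¬ x < b := hx b (by simp)
    have hbs : ∀ c ∈ bs, ¬ x < c := fun c hc => hx c (by simp [hc])
    cases A with
    | nil =>
      simp only [List.nil_append, gLoop, hxb, gLoop_nil_left]
      have := ih [] x hbs
      simpa [gLoop_nil_left] using this
    | cons a as =>
      simp only [List.cons_append, gLoop]
      by_cases hab : a < b
      · simp [hab, ih as x hbs]
      · simpa [hab] using ih (a :: as) x hbs

theorem gLoop_singleton (x y : Int) (hxy : x < y) :
    ∀ B : List Int, gLoop [x] (B ++ [y]) = 1 := by
  intro B
  induction B with
  | nil => simp [gLoop, hxy]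
  | cons b bs ih =>
    simp only [List.cons_append, gLoop]
    by_cases hxb : x < b
    · simp [hxb, gLoop_nil_left]
    · simpa [hxb] using ih

-- appending x to A and y to B, with x < y and y beating all of A, adds exactly one match
theorem gLoop_append_match (B : List Int) : ∀ (A : List Int) (x y : Int),
    x < y → (∀ a ∈ A, a < y) → gLoop (A ++ [x]) (B ++ [y]) = 1 + gLoop A B := by
  induction B with
  | nil =>
    intro A x y hxy hA
    cases A with
    | nil => simpa [gLoop_nil_right] using gLoop_singleton x y hxy []
    | cons a as =>
      have hay : a < y := hA a (by simp)
      simp [gLoop, hay]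
  | cons b bs ih =>
    intro A x y hxy hA
    cases A with
    | nil =>
      simpa [gLoop_nil_left] using gLoop_singleton x y hxy (b :: bs)
    | cons a as =>
      simp only [List.cons_append, gLoop]
      by_cases hab : a < b
      · have has : ∀ c ∈ as, c < y := fun c hc => hA c (by simp [hc])
        simp [hab, ih as x y hxy has]
      · have := ih (a :: as) x y hxy hA
        simp only [List.cons_append] at this
        simp [hab, this]

-- A's pop-from-the-top loop equals the two-pointer count on sorted lists
theorem loop_eq_gLoop : ∀ (n : Nat) (A B : List Int), A.length + B.length ≤ n →
    A.Pairwise (· ≤ ·) → B.Pairwise (· ≤ ·) → solutionLoop A B = gLoop A B := by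
  intro n
  induction n with
  | zero =>
    intro A B hn _ _
    have hA : A = [] := by cases A <;> simp_all
    subst hA; rw [solutionLoop]; simp [gLoop_nil_left]
  | succ n ih =>
    intro A B hn hA hB
    cases hAe : A with
    | nil => rw [solutionLoop]; simp [gLoop_nil_left]
    | cons a as =>
      cases hBe : B with
      | nil => rw [solutionLoop]; simp [gLoop_nil_right]
      | cons b bs =>
        subst hAe hBe
        have hAne : (a :: as : List Int) ≠ [] := by simp
        have hBne : (b :: bs : List Int) ≠ [] := by simp
        set x := (a :: as).getLast hAne with hxdef
        set y := (b :: bs).getLast hBne with hydef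
        have hAdec : (a :: as).dropLast ++ [x] = a :: as := List.dropLast_append_getLast hAne
        have hBdec : (b :: bs).dropLast ++ [y] = b :: bs := List.dropLast_append_getLast hBne
        -- sortedness of the prefixes and bounds on all elements
        have hA' : ((a :: as).dropLast ++ [x]).Pairwise (· ≤ ·) := by rw [hAdec]; exact hA
        have hB' : ((b :: bs).dropLast ++ [y]).Pairwise (· ≤ ·) := by rw [hBdec]; exact hB
        rw [List.pairwise_append] at hA' hB'
        have hAle : ∀ c ∈ (a :: as), c ≤ x := by
          intro c hc
          rw [← hAdec] at hc
          rcases List.mem_append.mp hc with h | h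
          · exact hA'.2.2 c h x (by simp)
          · simp at h; omega
        have hBle : ∀ c ∈ (b :: bs), c ≤ y := by
          intro c hc
          rw [← hBdec] at hc
          rcases List.mem_append.mp hc with h | h
          · exact hB'.2.2 c h y (by simp)
          · simp at h; omega
        have hlenA : (a :: as).dropLast.length < (a :: as).length := by
          simp [List.length_dropLast]
        have hlenB : (b :: bs).dropLast.length ≤ (b :: bs).length := by
          simp [List.length_dropLast]
        rw [solutionLoop]
        simp only [hAne, hBne, ne_eq, not_false_iff, and_self, dif_pos]
        by_cases hxy : x < y
        · rw [if_pos (by rw [← hxdef, ← hydef]; exact hxy)]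
          rw [ih _ _ (by simp [List.length_dropLast] at hn ⊢; omega) hA'.1 hB'.1]
          have hall : ∀ c ∈ (a :: as).dropLast, c < y := by
            intro c hc
            have : c ≤ x := hAle c (by rw [← hAdec]; exact List.mem_append.mpr (Or.inl hc))
            omega
          calc 1 + gLoop (a :: as).dropLast (b :: bs).dropLast
              = gLoop ((a :: as).dropLast ++ [x]) ((b :: bs).dropLast ++ [y]) :=
                (gLoop_append_match _ _ x y hxy hall).symm
            _ = gLoop (a :: as) (b :: bs) := by rw [hAdec, hBdec]
        · rw [if_neg (by rw [← hxdef, ← hydef]; exact hxy)]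
          rw [ih _ _ (by simp [List.length_dropLast] at hn ⊢; omega) hA'.1 hB]
          have hall : ∀ c ∈ (b :: bs), ¬ x < c := by
            intro c hc
            have := hBle c hc
            omega
          calc gLoop (a :: as).dropLast (b :: bs)
              = gLoop ((a :: as).dropLast ++ [x]) (b :: bs) :=
                (gLoop_append_big _ _ x hall).symm
            _ = gLoop (a :: as) (b :: bs) := by rw [hAdec]

-- B's fold with an integer index equals the abstract two-pointer pass on the suffix
theorem fold_eq_gLoop (sA : List Int) : ∀ (B : List Int) (i count : Int),
    0 ≤ i → i ≤ (sA.length : Int) →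
    (B.foldl (fun (st : Int × Int) b =>
        if st.1 < (sA.length : Int) ∧ PySem.List.pyGetD sA st.1 0 < b
        then (st.1 + 1, st.2 + 1) else st) (i, count)).2
      = count + gLoop (sA.drop i.toNat) B := by
  intro B
  induction B with
  | nil => intro i count _ _; simp [gLoop_nil_right]
  | cons b bs ih =>
    intro i count h0 hlen
    by_cases hi : i < (sA.length : Int)
    · have hnat : i.toNat < sA.length := by omega
      have hdrop : sA.drop i.toNat = sA[i.toNat] :: sA.drop (i.toNat + 1) :=
        List.drop_eq_getElem_cons hnat
      have hget : PySem.List.pyGetD sA i 0 = sA[i.toNat] :=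
        PySem.List.pyGetD_eq_getElem sA 0 h0 hi
      by_cases hab : sA[i.toNat] < b
      · simp only [List.foldl_cons, hi, hget, hab, and_self, if_pos]
        rw [ih (i + 1) (count + 1) (by omega) (by omega)]
        have : (i + 1).toNat = i.toNat + 1 := by omega
        rw [this, hdrop]
        simp [gLoop, hab]
        omega
      · simp only [List.foldl_cons, hget, hab, and_false, if_neg, not_false_iff]
        rw [ih i count h0 hlen, hdrop]
        simp [gLoop, hab]
    · have hE : sA.drop i.toNat = [] := by
        apply List.drop_eq_nil_of_le; omega
      simp only [List.foldl_cons, hi, false_and, if_neg, not_false_iff]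
      rw [ih i count h0 hlen, hE]
      simp [gLoop_nil_left, gLoop]

-- ===== VERDICT (by name: the statement is the Claim_ definition above) =====
theorem solution_spec : Claim_equal_solution := by
  intro A B _
  unfold Spec_solution solution solution_alt
  set sA := PySem.List.sorted A (fun x => x) false with hsA
  set sB := PySem.List.sorted B (fun x => x) false with hsB
  have hA : sA.Pairwise (· ≤ ·) := PySem.List.sorted_pairwise A (fun x => x) ..
  have hB : sB.Pairwise (· ≤ ·) := PySem.List.sorted_pairwise B (fun x => x) ..
  rw [loop_eq_gLoop (sA.length + sB.length) sA sB le_rfl hA hB]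
  have := fold_eq_gLoop sA sB 0 0 le_rfl (by positivity)
  simp only [Int.toNat_zero, List.drop_zero, zero_add] at this
  exact this.symm
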